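-- pv_equiv track=rewrite | github.com/DragunWF/Competitive-Programming | CodeWars/python/4_kyu/next_smaller_number_with_the_same_digits.py | is_valid_num
-- ===== SOURCE A (Python) =====
-- def is_valid_num(n: int) -> bool:
--     if n <= 9:
--         return False
--     str_num = str(n)
--     if len(set(str_num)) == 1:
--         return False
--     str_num = "".join(digit for digit in str_num if digit != "0")
--     for i in range(1, len(str_num)):
--         if int(str_num[i - 1]) > int(str_num[i]):
--             return True
--     return False
-- ===== SOURCE B (Python) =====
-- def is_valid_num(n: int) -> bool:
--     if n <= 9:
--         return False
--     filtered = [d for d in str(n) if d != "0"]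
--     return filtered != sorted(filtered)
-- ===== Notes on version B (the rewrite author's own statement) =====
-- stated objective: simpler
-- what changed: Replaces the set-cardinality guard plus the index loop converting adjacent digit pairs to ints with a single sort-and-compare: the zero-filtered digit list is out of order iff it differs from its sorted arrangement.
import Mathlib
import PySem

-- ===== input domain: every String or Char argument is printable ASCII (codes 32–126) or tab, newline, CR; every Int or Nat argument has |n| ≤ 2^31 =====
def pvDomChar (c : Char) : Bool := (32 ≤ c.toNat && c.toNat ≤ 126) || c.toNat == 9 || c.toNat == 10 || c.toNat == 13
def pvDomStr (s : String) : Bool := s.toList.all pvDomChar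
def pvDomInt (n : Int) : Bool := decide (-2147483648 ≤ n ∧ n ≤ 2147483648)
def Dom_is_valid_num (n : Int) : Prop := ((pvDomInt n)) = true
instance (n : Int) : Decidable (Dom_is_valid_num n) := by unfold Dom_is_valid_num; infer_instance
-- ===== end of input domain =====

-- B replaces A's set-cardinality guard and index loop by a sort-and-compare on the
-- zero-filtered digits (objective: simpler; same result, not faster).

-- ===== PORT A =====
-- int(c) for a single character; exact for the digit characters this port applies it to
-- (str(n) for n > 9 consists of digits only, and '0' has been filtered out is irrelevant here).
def pyDigit (c : Char) : Int := (c.toNat : Int) - 48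

-- the index loop 'for i in range(1, len(l)): if int(l[i-1]) > int(l[i]): return True'
def loopA (l : List Char) (i : Nat) : Bool :=
  if i < l.length then
    if pyDigit (l.getD (i - 1) ' ') > pyDigit (l.getD i ' ') then true
    else loopA l (i + 1)
  else false
termination_by l.length - i

def is_valid_num (n : Int) : Bool :=
  if n ≤ 9 then false
  else
    let str_num := (PySem.Int.toStr n).toList
    if (PySem.Set.ofList str_num).length = 1 then false
    else
      let str_num := str_num.filter (fun d => d ≠ '0')
      loopA str_num 1

-- ===== PORT B =====
def is_valid_num_alt (n : Int) : Bool :=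
  if n ≤ 9 then false
  else
    let filtered := ((PySem.Int.toStr n).toList).filter (fun d => d ≠ '0')
    decide (filtered ≠ PySem.List.sorted filtered (fun x => x) false)

-- ===== PRECONDITION & SPEC =====
def Spec_is_valid_num (n : Int) (out : Bool) : Prop := out = is_valid_num_alt n
instance (n : Int) (out : Bool) : Decidable (Spec_is_valid_num n out) := by unfold Spec_is_valid_num; infer_instance

-- ===== CLAIM (what is proved, stated in full; the proofs are below) =====
def Claim_equal_is_valid_num : Prop := ∀ (n : Int), Dom_is_valid_num n → Spec_is_valid_num n (is_valid_num n)

-- ===== LEMMAS AND PROOFS =====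

theorem pyDigit_le {a b : Char} : pyDigit a ≤ pyDigit b ↔ a ≤ b := by
  rw [Char.le_def, UInt32.le_iff_toNat_le]
  simp only [pyDigit, Char.toNat]
  omega

-- loopA l i = false iff every adjacent pair from index i on is nondecreasing
theorem loopA_false (l : List Char) (i : Nat) :
    loopA l i = false ↔ ∀ j, i ≤ j → j < l.length → l.getD (j - 1) ' ' ≤ l.getD j ' ' := by
  by_cases h : i < l.length
  · rw [loopA]
    simp only [if_pos h]
    by_cases hd : pyDigit (l.getD (i - 1) ' ') > pyDigit (l.getD i ' ')
    · simp only [if_pos hd]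
      constructor
      · intro hfalse; exact absurd hfalse (by simp)
      · intro hall
        have := hall i le_rfl h
        rw [← pyDigit_le] at this
        omega
    · simp only [if_neg hd]
      rw [loopA_false l (i + 1)]
      constructor
      · intro hall j hij hj
        rcases Nat.lt_or_ge i j with hlt | hge
        · exact hall j hlt hj
        · have hji : j = i := le_antisymm hge hij
          subst hji
          rw [← pyDigit_le]; omega
      · intro hall j hij hj; exact hall j (by omega) hj
  · rw [loopA]
    simp only [if_neg h]
    constructor
    · intro _ j _ hj; omega
    · intro _; trivial
termination_by l.length - i

theorem isChain_iff_loop (l : List Char) :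
    l.IsChain (· ≤ ·) ↔ ∀ j, 1 ≤ j → j < l.length → l.getD (j - 1) ' ' ≤ l.getD j ' ' := by
  rw [List.isChain_iff_getElem]
  constructor
  · intro h j h1 hj
    have := h (j - 1) (by omega)
    rw [List.getD_eq_getElem l ' ' (by omega : j - 1 < l.length),
        List.getD_eq_getElem l ' ' hj]
    simpa [Nat.sub_add_cancel h1] using this
  · intro h k hk
    have h2 := h (k + 1) (by omega) (by omega)
    simp only [Nat.add_sub_cancel] at h2
    rwa [List.getD_eq_getElem l ' ' (by omega : k < l.length),
      List.getD_eq_getElem l ' ' (by omega : k + 1 < l.length)] at h2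

theorem sorted_eq_self_iff (l : List Char) :
    PySem.List.sorted l (fun x => x) false = l ↔ l.Pairwise (· ≤ ·) := by
  constructor
  · intro h
    have := PySem.List.sorted_pairwise l (fun x : Char => x)
    rw [h] at this
    exact this
  · exact PySem.List.sorted_eq_self_of_pairwise l (fun x : Char => x)

-- A's adjacent-pair loop decides exactly "the list differs from its sorted arrangement"
theorem loop_eq_sortcmp (l : List Char) :
    loopA l 1 = decide (l ≠ PySem.List.sorted l (fun x => x) false) := by
  by_cases h : l.Pairwise (· ≤ ·)
  · have hs : PySem.List.sorted l (fun x => x) false = l := (sorted_eq_self_iff l).mpr h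
    have hf : loopA l 1 = false := by
      rw [loopA_false]
      exact (isChain_iff_loop l).mp (List.isChain_iff_pairwise.mpr h)
    simp [hf, hs]
  · have hs : l ≠ PySem.List.sorted l (fun x => x) false := fun hc =>
      h ((sorted_eq_self_iff l).mp hc.symm)
    have hf : loopA l 1 = true := by
      cases hb : loopA l 1 with
      | true => rfl
      | false =>
        rw [loopA_false] at hb
        exact absurd (List.isChain_iff_pairwise.mp ((isChain_iff_loop l).mpr hb)) h
    simp [hf, hs]

-- in A's set-cardinality-1 branch all characters are equal, hence pairwise ≤
theorem all_eq_of_ofList_len_one {l : List Char} (h : (PySem.Set.ofList l).length = 1) :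
    l.Pairwise (· ≤ ·) := by
  obtain ⟨c, hc⟩ := List.length_eq_one_iff.mp h
  have hmem : ∀ x ∈ l, x = c := by
    intro x hx
    have : x ∈ PySem.Set.ofList l := (PySem.Set.mem_ofList l x).mpr hx
    rw [hc] at this
    simpa using this
  rw [List.eq_replicate_of_mem hmem]
  rw [List.pairwise_replicate]
  exact Or.inr le_rfl

-- ===== VERDICT (by name: the statement is the Claim_ definition above) =====
theorem is_valid_num_spec : Claim_equal_is_valid_num := by
  intro n _
  unfold Spec_is_valid_num is_valid_num is_valid_num_alt
  by_cases h9 : n ≤ 9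
  · simp [h9]
  · simp only [if_neg h9]
    by_cases hset : (PySem.Set.ofList ((PySem.Int.toStr n).toList)).length = 1
    · rw [if_pos hset]
      have hsor := (sorted_eq_self_iff (((PySem.Int.toStr n).toList).filter (fun d => d ≠ '0'))).mpr
        ((all_eq_of_ofList_len_one hset).filter _)
      rw [hsor]
      simp
    · rw [if_neg hset]
      exact loop_eq_sortcmp _
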